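-- pv_equiv track=rewrite | github.com/vineetred/aesDES | basic.py | columnHello
-- ===== SOURCE A (Python) =====
-- def columnHello(test):
--     c = []
--     letters = []
--     k =0
--     for j in range(0,4):
--         for i in range(0,4):
--             letters.append(test[(8*i)+k:(8*i)+2+k])
--         k+=2
--         c.append(letters)
--         letters = []
--     return c
-- ===== SOURCE B (Python) =====
-- def columnHello(test):
--     # Build the 16 two-char chunks in reading order, pack them row-major
--     # into a 4x4 matrix, then transpose (A fills the grid column-major).
--     chunks = [test[p:p + 2] for p in range(0, 32, 2)]
--     matrix = [chunks[4 * i:4 * i + 4] for i in range(4)]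
--     return [list(col) for col in zip(*matrix)]
-- ===== Notes on version B (the rewrite author's own statement) =====
-- stated objective: idiomatic
-- what changed: Replaces A's position-arithmetic double loop (start = 8*i+k with a mutated k) by building the 16 chunks in reading order, packing them row-major into a 4x4 matrix, and returning its transpose via zip(*matrix).
import Mathlib
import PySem

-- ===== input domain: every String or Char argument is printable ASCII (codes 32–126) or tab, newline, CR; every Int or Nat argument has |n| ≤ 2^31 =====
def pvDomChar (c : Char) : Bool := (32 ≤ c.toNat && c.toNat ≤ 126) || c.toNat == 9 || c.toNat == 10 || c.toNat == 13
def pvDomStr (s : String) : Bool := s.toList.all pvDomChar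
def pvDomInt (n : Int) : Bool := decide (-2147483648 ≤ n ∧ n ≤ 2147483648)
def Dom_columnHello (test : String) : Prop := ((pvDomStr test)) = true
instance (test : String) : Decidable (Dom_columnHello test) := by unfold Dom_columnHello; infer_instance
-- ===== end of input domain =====

-- B changes only the decomposition (chunk table + transpose instead of index arithmetic); equal output everywhere.

-- ===== PORT A =====
-- state: (c, k); for each j: letters built by the inner i-loop with the current k, then k += 2, c.append(letters)
def columnHello (test : String) : List (List String) :=
  (PySem.List.pyRange 0 4 1).foldl
    (fun (st : List (List String) × Int) _j =>
      let letters :=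
        (PySem.List.pyRange 0 4 1).foldl
          (fun (ls : List String) i =>
            ls ++ [PySem.Str.slice test (some (8 * i + st.2)) (some (8 * i + 2 + st.2))])
          []
      (st.1 ++ [letters], st.2 + 2))
    ([], 0) |>.1

-- ===== PORT B =====
-- zip(a, b, c, d): truncating 4-way zip, each tuple listed (B's zip(*matrix) on the 4 rows)
def pvZip4 : List String → List String → List String → List String → List (List String)
  | a :: as, b :: bs, c :: cs, d :: ds => [a, b, c, d] :: pvZip4 as bs cs ds
  | _, _, _, _ => []

def columnHello_alt (test : String) : List (List String) :=
  let chunks := (PySem.List.pyRange 0 32 2).map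
    (fun p => PySem.Str.slice test (some p) (some (p + 2)))
  let matrix := (PySem.List.pyRange 0 4 1).map
    (fun i => PySem.List.slice chunks (some (4 * i)) (some (4 * i + 4)))
  match matrix with
  | [r0, r1, r2, r3] => pvZip4 r0 r1 r2 r3
  | _ => []   -- unreachable: matrix always has exactly 4 rows

-- ===== PRECONDITION & SPEC =====
def Spec_columnHello (test : String) (out : List (List String)) : Prop := out = columnHello_alt test
instance (test : String) (out : List (List String)) : Decidable (Spec_columnHello test out) := by unfold Spec_columnHello; infer_instance

-- ===== CLAIM (what is proved, stated in full; the proofs are below) =====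
def Claim_equal_columnHello : Prop := ∀ (test : String), Dom_columnHello test → Spec_columnHello test (columnHello test)

-- ===== LEMMAS AND PROOFS =====

-- ===== VERDICT (by name: the statement is the Claim_ definition above) =====
theorem columnHello_spec : Claim_equal_columnHello := by
  intro test _
  unfold Spec_columnHello columnHello columnHello_alt
  have h4 : PySem.List.pyRange 0 4 1 = [0, 1, 2, 3] := by decide
  have h32 : PySem.List.pyRange 0 32 2 =
      [0, 2, 4, 6, 8, 10, 12, 14, 16, 18, 20, 22, 24, 26, 28, 30] := by decide
  rw [h4, h32]
  simp [List.foldl, pvZip4, PySem.List.slice]
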